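-- pv_equiv track=rewrite | github.com/towkictg/RSA- | verify.py | decrypt_signed_message
-- ===== SOURCE A (Python) =====
-- def square_and_multiply(base, exponent, modulus):
--     # Convert the exponent to binary format
--     exponent_binary = bin(exponent)[2:]
--     # Initialize result to 1
--     result = 1
--     # Traverse through each bit in the binary exponent
--     for bit in exponent_binary:
--         result = (result ** 2) % modulus  # Square the result
--         if bit == '1':
--             result = (result * base) % modulus  # Multiply by base if this bit is 1
--     return result
--
-- def decrypt_signed_message(signed_message, e, N):
--     decrypted_message = ""
--     for signed_chunk in signed_message:
--         # Decrypt each chunk of the signed message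
--         decrypted_chunk = square_and_multiply(signed_chunk, e, N)
--         # Conversion of the decrypted integer to hexadecimal
--         decrypted_chunk_hex = hex(decrypted_chunk)[2:]
--         # Treat two hexadecimal characters as one byte (8 bits)
--         decrypted_chunk_string = "".join(chr(int(decrypted_chunk_hex[i:i+2], 16)) for i in range(0, len(decrypted_chunk_hex), 2))
--         # Append the decrypted chunk to the full message
--         decrypted_message += decrypted_chunk_string
--     return decrypted_message
-- ===== SOURCE B (Python) =====
-- def decrypt_signed_message(signed_message, e, N):
--     if e < 0:
--         raise ValueError("exponent must be nonnegative")
--     chars = []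
--     for chunk in signed_message:
--         # modular exponentiation, scanning the exponent least-significant bit first
--         r, b, m = 1 % N, chunk % N, e
--         while m:
--             if m & 1:
--                 r = r * b % N
--             b = b * b % N
--             m >>= 1
--         # split the residue into hex nibbles, most significant first
--         nibbles = []
--         while r:
--             nibbles.append(r & 15)
--             r >>= 4
--         if not nibbles:
--             nibbles.append(0)
--         nibbles.reverse()
--         # every two nibbles form one character code; a trailing lone nibble is its own code
--         i = 0
--         while i + 1 < len(nibbles):
--             chars.append(chr(nibbles[i] << 4 | nibbles[i + 1]))
--             i += 2
--         if i < len(nibbles):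
--             chars.append(chr(nibbles[i]))
--     return "".join(chars)
-- ===== Notes on version B (the rewrite author's own statement) =====
-- stated objective: alternative
-- what changed: Modular exponentiation is redone right-to-left (LSB-first, maintaining a running square of the base) instead of A's left-to-right fold over bin()'s digit string, and the per-chunk hex-string slicing/int(...,16)/chr assembly is replaced by building the residue's nibble list arithmetically and pairing nibbles into character codes; Pre_ excludes e < 0, where A's bin(e)[2:] silently drops the sign (so A returns pow(base, -e, N)) while B's exponentiation rejects a negative exponent with ValueError, and N <= 0, where A raises except in the corner where every chunk's residue is 0.
-- outside the precondition, e.g. on decrypt_signed_message([2], -3, 7): A returns '\x01', B raises ValueError; on decrypt_signed_message([5], 1, -5): A returns '\x00', B returns '\x00'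
import Mathlib
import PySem

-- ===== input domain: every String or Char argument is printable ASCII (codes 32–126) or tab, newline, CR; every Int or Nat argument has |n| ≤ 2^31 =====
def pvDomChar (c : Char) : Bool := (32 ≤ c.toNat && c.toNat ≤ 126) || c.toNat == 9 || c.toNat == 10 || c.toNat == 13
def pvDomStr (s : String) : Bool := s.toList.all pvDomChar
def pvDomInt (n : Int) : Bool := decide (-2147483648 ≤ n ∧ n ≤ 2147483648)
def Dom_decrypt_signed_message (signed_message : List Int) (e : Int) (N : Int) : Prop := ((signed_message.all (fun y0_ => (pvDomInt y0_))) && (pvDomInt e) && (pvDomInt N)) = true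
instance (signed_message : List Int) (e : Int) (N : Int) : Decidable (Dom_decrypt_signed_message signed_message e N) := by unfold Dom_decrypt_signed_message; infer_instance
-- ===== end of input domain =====

-- B redoes the modular exponentiation right-to-left (LSB-first, with a running square of
-- the base) instead of A's fold over bin()'s digit string, and assembles each chunk's
-- characters from an arithmetically built nibble list instead of slicing a hex string;
-- alternative, not claimed faster. Python's growing result string is modelled as its
-- character list, wrapped in String once at the end (both ports alike).

-- ===== PORT A =====
-- hex(n)[2:]: most-significant-first hex digits; the n < 0 branch mirrors '-0x…'[2:] = 'x…'
-- (that branch is unreachable under Pre_, where residues are nonnegative).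
def pvHexAux (n : Nat) (acc : List Char) : List Char :=
  if n < 16 then Nat.digitChar n :: acc
  else pvHexAux (n / 16) (Nat.digitChar (n % 16) :: acc)
termination_by n
decreasing_by exact Nat.div_lt_self (by omega) (by omega)

def pvHexStr (n : Int) : List Char :=
  if n < 0 then 'x' :: pvHexAux (-n).toNat [] else pvHexAux n.toNat []

-- ''.join(chr(int(l[i:i+2], 16)) for i in range(0, len(l), 2)), written as the index loop
-- the step-2 range generator is (i = 0, 2, 4, … while i < len).  chr(k) = Char.ofNat k,
-- exact for the values k < 256 that occur here; int(s, 16) = PySem.Int.ofCharsBase? s 16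
-- (none = ValueError; the .getD 0 branch is unreachable on the hex-digit slices produced
-- under Pre_).
def pvPairJoin (l : List Char) (i : Nat) : List Char :=
  if i < l.length then
    Char.ofNat ((PySem.Int.ofCharsBase? (PySem.List.slice l (some (i : Int)) (some ((i : Int) + 2))) 16).getD 0).toNat
      :: pvPairJoin l (i + 2)
  else []
termination_by l.length - i
decreasing_by omega

def square_and_multiply (base exponent modulus : Int) : Int :=
  -- exponent_binary = bin(exponent)[2:]
  let exponent_binary := PySem.List.slice (PySem.Int.toBinChars0b exponent) (some 2) none
  exponent_binary.foldl (fun result bit =>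
    let result2 := PySem.Int.mod (result ^ 2) modulus
    if bit = '1' then PySem.Int.mod (result2 * base) modulus else result2) 1

def decrypt_signed_message (signed_message : List Int) (e : Int) (N : Int) : String :=
  String.ofList (signed_message.foldl (fun acc signed_chunk =>
    acc ++ pvPairJoin (pvHexStr (square_and_multiply signed_chunk e N)) 0) [])

-- ===== PORT B =====
-- r, b, m = 1 % N, chunk % N, e; while m: if m & 1: r = r*b%N; b = b*b%N; m >>= 1
-- (B raises ValueError for e < 0, excluded by Pre_; under Pre_ the loop counter is the
-- natural number e.toNat, with &1 = %2 and >>1 = /2)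
def pvPowModRTL (m : Nat) (b r N : Int) : Int :=
  if m = 0 then r
  else pvPowModRTL (m / 2) (PySem.Int.mod (b * b) N)
         (if m % 2 = 1 then PySem.Int.mod (r * b) N else r) N
termination_by m
decreasing_by exact Nat.div_lt_self (by omega) (by omega)

-- nibbles = []; while r: nibbles.append(r & 15); r >>= 4  (low nibble first; r ≥ 0 under Pre_)
def pvNibsLow (t : Nat) : List Nat :=
  if t = 0 then [] else (t % 16) :: pvNibsLow (t / 16)
termination_by t
decreasing_by exact Nat.div_lt_self (by omega) (by omega)

-- if not nibbles: nibbles.append(0); nibbles.reverse()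
def pvNibs (r : Nat) : List Nat :=
  (if pvNibsLow r = [] then [0] else pvNibsLow r).reverse

-- the index-2 pairing loop over the nibble list, consuming two nibbles per character;
-- a trailing lone nibble is its own code ('i + 1 < len' fails, 'i < len' holds)
def pvPairUp : List Nat → List Char
  | [] => []
  | [a] => [Char.ofNat a]
  | a :: b :: t => Char.ofNat ((a <<< 4) ||| b) :: pvPairUp t

def decrypt_signed_message_alt (signed_message : List Int) (e : Int) (N : Int) : String :=
  String.ofList ((signed_message.map (fun chunk =>
    pvPairUp (pvNibs (pvPowModRTL e.toNat (PySem.Int.mod chunk N) (PySem.Int.mod 1 N) N).toNat))).flatten)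

-- ===== PRECONDITION & SPEC =====
-- Pre_ excludes e < 0, where A's bin(e)[2:] silently drops the sign (so A returns
-- pow(base, -e, N)) while B's exponentiation rejects a negative exponent with ValueError,
-- and N ≤ 0, where A raises ZeroDivisionError (N = 0) or ValueError on hex() of a negative
-- residue (N < 0), except in the corner where every chunk's residue is 0.
def Pre_decrypt_signed_message (signed_message : List Int) (e : Int) (N : Int) : Prop := 0 ≤ e ∧ 1 ≤ N
instance (signed_message : List Int) (e : Int) (N : Int) : Decidable (Pre_decrypt_signed_message signed_message e N) := by unfold Pre_decrypt_signed_message; infer_instance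

def pvWitness_decrypt_signed_message : List Int × Int × Int := ([72, 105], 1, 256)

def Spec_decrypt_signed_message (signed_message : List Int) (e : Int) (N : Int) (out : String) : Prop := out = decrypt_signed_message_alt signed_message e N
instance (signed_message : List Int) (e : Int) (N : Int) (out : String) : Decidable (Spec_decrypt_signed_message signed_message e N out) := by unfold Spec_decrypt_signed_message; infer_instance

-- ===== CLAIM (what is proved, stated in full; the proofs are below) =====
def Claim_equal_decrypt_signed_message : Prop := ∀ (signed_message : List Int) (e : Int) (N : Int), Dom_decrypt_signed_message signed_message e N → Pre_decrypt_signed_message signed_message e N → Spec_decrypt_signed_message signed_message e N (decrypt_signed_message signed_message e N)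

-- ===== LEMMAS AND PROOFS =====

-- ---- modular-exponentiation side ----

-- value of a binary digit string under A's Horner fold ('1' counts 1, anything else 0)
def pvVal (cs : List Char) : Nat := cs.foldl (fun a c => 2 * a + (if c = '1' then 1 else 0)) 0

-- structural binary digits, most significant first (what Nat.toDigits 2 computes)
def pvBin (n : Nat) : List Char :=
  if n < 2 then [Nat.digitChar n] else pvBin (n / 2) ++ [Nat.digitChar (n % 2)]
termination_by n
decreasing_by exact Nat.div_lt_self (by omega) (by omega)

lemma pmod_emod (x N : Int) (hN : 1 ≤ N) : PySem.Int.mod x N = x % N :=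
  PySem.Int.mod_eq_emod_of_pos (by omega)

lemma pmod_modeq (x N : Int) (hN : 1 ≤ N) : PySem.Int.mod x N ≡ x [ZMOD N] := by
  rw [pmod_emod x N hN]
  exact Int.emod_emod_of_dvd x dvd_rfl

lemma pvVal_from (cs : List Char) : ∀ a : Nat,
    cs.foldl (fun a c => 2 * a + (if c = '1' then 1 else 0)) a = a * 2 ^ cs.length + pvVal cs := by
  induction cs with
  | nil => intro a; simp [pvVal]
  | cons c cs ih =>
    intro a
    simp only [List.foldl_cons, List.length_cons, pvVal] at *
    rw [ih, ih (2 * 0 + (if c = '1' then 1 else 0))]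
    ring

lemma toDigitsCore_eq (f : Nat) : ∀ n acc, n < f → Nat.toDigitsCore 2 f n acc = pvBin n ++ acc := by
  induction f with
  | zero => omega
  | succ f ih =>
    intro n acc h
    rw [Nat.toDigitsCore]
    have hiff : n / 2 = 0 ↔ n < 2 := by omega
    by_cases h2 : n < 2
    · rw [if_pos (hiff.mpr h2)]
      conv_rhs => rw [pvBin]
      rw [if_pos h2]
      congr 2
      omega
    · rw [if_neg (fun hc => h2 (hiff.mp hc)), ih (n/2) _ (by omega)]
      conv_rhs => rw [pvBin]
      rw [if_neg h2, List.append_assoc]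
      rfl

lemma toDigits_eq (n : Nat) : Nat.toDigits 2 n = pvBin n := by
  have := toDigitsCore_eq (n+1) n [] (by omega)
  simpa [Nat.toDigits] using this

lemma pvBin_ne_nil (n : Nat) : pvBin n ≠ [] := by
  rw [pvBin]; split <;> simp

lemma pvVal_pvBin (n : Nat) : pvVal (pvBin n) = n := by
  induction n using Nat.strong_induction_on with
  | _ n ih =>
    rw [pvBin]
    by_cases h : n < 2
    · rw [if_pos h]; interval_cases n <;> decide
    · rw [if_neg h]
      unfold pvVal
      rw [List.foldl_append]
      have hv := ih (n/2) (by omega)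
      unfold pvVal at hv
      rw [hv]
      simp only [List.foldl_cons, List.foldl_nil]
      have hd : Nat.digitChar (n % 2) = '1' ↔ n % 2 = 1 := by
        rcases Nat.mod_two_eq_zero_or_one n with h2 | h2 <;> simp [h2, Nat.digitChar]
      split
      next h1 => have := hd.mp h1; omega
      next h1 => have : n % 2 ≠ 1 := fun hh => h1 (hd.mpr hh); omega

lemma foldA_mod (base N : Int) (hN : 1 ≤ N) : ∀ (cs : List Char) (r : Int), cs ≠ [] →
    (cs.foldl (fun result bit =>
      let result2 := PySem.Int.mod (result ^ 2) N
      if bit = '1' then PySem.Int.mod (result2 * base) N else result2) r) % N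
    = cs.foldl (fun result bit =>
      let result2 := PySem.Int.mod (result ^ 2) N
      if bit = '1' then PySem.Int.mod (result2 * base) N else result2) r := by
  intro cs
  induction cs with
  | nil => simp
  | cons c cs ih =>
    intro r _
    by_cases hc : cs = []
    · subst hc
      simp only [List.foldl_cons, List.foldl_nil]
      split <;> simp [pmod_emod _ _ hN, Int.emod_emod_of_dvd _ dvd_rfl]
    · simp only [List.foldl_cons]
      exact ih _ hc

lemma foldA_cong (base N : Int) (hN : 1 ≤ N) : ∀ (cs : List Char) (r : Int),
    cs.foldl (fun result bit =>
      let result2 := PySem.Int.mod (result ^ 2) N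
      if bit = '1' then PySem.Int.mod (result2 * base) N else result2) r
    ≡ r ^ (2 ^ cs.length) * base ^ (pvVal cs) [ZMOD N] := by
  intro cs
  induction cs with
  | nil => intro r; simp [pvVal]
  | cons c cs ih =>
    intro r
    simp only [List.foldl_cons]
    have step : (let result2 := PySem.Int.mod (r ^ 2) N
        if c = '1' then PySem.Int.mod (result2 * base) N else result2)
        ≡ r ^ 2 * base ^ (if c = '1' then 1 else 0) [ZMOD N] := by
      split
      · calc PySem.Int.mod (PySem.Int.mod (r ^ 2) N * base) N
            ≡ PySem.Int.mod (r ^ 2) N * base [ZMOD N] := pmod_modeq _ _ hN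
          _ ≡ r ^ 2 * base [ZMOD N] := Int.ModEq.mul (pmod_modeq _ _ hN) Int.ModEq.rfl
          _ = r ^ 2 * base ^ 1 := by ring
      · calc PySem.Int.mod (r ^ 2) N ≡ r ^ 2 [ZMOD N] := pmod_modeq _ _ hN
          _ = r ^ 2 * base ^ 0 := by ring
    have hval : pvVal (c :: cs) = (if c = '1' then 1 else 0) * 2 ^ cs.length + pvVal cs := by
      have h0 : pvVal (c :: cs) = cs.foldl (fun a c => 2 * a + (if c = '1' then 1 else 0))
          (2 * 0 + (if c = '1' then 1 else 0)) := rfl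
      rw [h0, pvVal_from]
      ring
    calc List.foldl _ (let result2 := PySem.Int.mod (r ^ 2) N
            if c = '1' then PySem.Int.mod (result2 * base) N else result2) cs
        ≡ (let result2 := PySem.Int.mod (r ^ 2) N
            if c = '1' then PySem.Int.mod (result2 * base) N else result2) ^ (2 ^ cs.length)
            * base ^ (pvVal cs) [ZMOD N] := ih _
      _ ≡ (r ^ 2 * base ^ (if c = '1' then 1 else 0)) ^ (2 ^ cs.length) * base ^ (pvVal cs) [ZMOD N] :=
          Int.ModEq.mul (Int.ModEq.pow _ step) Int.ModEq.rfl
      _ = r ^ (2 ^ (c :: cs).length) * base ^ (pvVal (c :: cs)) := by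
          rw [hval, mul_pow, ← pow_mul, ← pow_mul, pow_add, List.length_cons, pow_succ]
          ring

lemma bits_eq (e : Int) : PySem.List.slice (PySem.Int.toBinChars0b e) (some 2) none
    = if e < 0 then 'b' :: pvBin e.natAbs else pvBin e.natAbs := by
  rw [PySem.List.slice_from _ (by norm_num : (0:Int) ≤ 2)]
  unfold PySem.Int.toBinChars0b
  split
  next h =>
    show List.drop 2 ('-' :: '0' :: 'b' :: _) = _
    simp only [List.drop_succ_cons, List.drop_zero]
    rw [show Nat.toDigits 2 e.natAbs = pvBin e.natAbs from toDigits_eq _]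
  next h =>
    show List.drop 2 ('0' :: 'b' :: _) = _
    simp only [List.drop_succ_cons, List.drop_zero]
    rw [show Nat.toDigits 2 e.toNat = pvBin e.toNat from toDigits_eq _]
    congr 1
    omega

lemma pvVal_b_cons (cs : List Char) : pvVal ('b' :: cs) = pvVal cs := by
  have h0 : pvVal ('b' :: cs) = cs.foldl (fun a c => 2 * a + (if c = '1' then 1 else 0))
      (2 * 0 + (if 'b' = '1' then 1 else 0)) := rfl
  rw [h0, pvVal_from]
  norm_num [pvVal]
  decide

lemma sam_eq (base e N : Int) (hN : 1 ≤ N) :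
    square_and_multiply base e N = (base ^ e.natAbs) % N := by
  unfold square_and_multiply
  rw [bits_eq]
  have hne : (if e < 0 then 'b' :: pvBin e.natAbs else pvBin e.natAbs) ≠ [] := by
    split
    · simp
    · exact pvBin_ne_nil _
  have hval : pvVal (if e < 0 then 'b' :: pvBin e.natAbs else pvBin e.natAbs) = e.natAbs := by
    split
    · rw [pvVal_b_cons, pvVal_pvBin]
    · rw [pvVal_pvBin]
  have hc := foldA_cong base N hN (if e < 0 then 'b' :: pvBin e.natAbs else pvBin e.natAbs) 1
  have hm := foldA_mod base N hN (if e < 0 then 'b' :: pvBin e.natAbs else pvBin e.natAbs) 1 hne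
  rw [hval] at hc
  have : (1:Int) ^ (2 ^ (if e < 0 then 'b' :: pvBin e.natAbs else pvBin e.natAbs).length)
      * base ^ e.natAbs = base ^ e.natAbs := by ring
  rw [this] at hc
  calc (if e < 0 then 'b' :: pvBin e.natAbs else pvBin e.natAbs).foldl _ 1
      = _ % N := hm.symm
    _ = (base ^ e.natAbs) % N := hc

lemma rtl_cong (N : Int) (hN : 1 ≤ N) : ∀ (m : Nat) (b r : Int),
    pvPowModRTL m b r N ≡ r * b ^ m [ZMOD N] := by
  intro m
  induction m using Nat.strong_induction_on with
  | _ m ih =>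
    intro b r
    rw [pvPowModRTL]
    by_cases h0 : m = 0
    · simp [h0]
    · rw [if_neg h0]
      have step := ih (m / 2) (Nat.div_lt_self (by omega) (by omega))
        (PySem.Int.mod (b * b) N) (if m % 2 = 1 then PySem.Int.mod (r * b) N else r)
      have hr : (if m % 2 = 1 then PySem.Int.mod (r * b) N else r) ≡ r * b ^ (m % 2) [ZMOD N] := by
        split
        next h1 => rw [h1, pow_one]; exact pmod_modeq _ _ hN
        next h1 => have : m % 2 = 0 := by omega
                   rw [this, pow_zero, mul_one]
      calc pvPowModRTL (m / 2) (PySem.Int.mod (b * b) N)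
              (if m % 2 = 1 then PySem.Int.mod (r * b) N else r) N
          ≡ (if m % 2 = 1 then PySem.Int.mod (r * b) N else r)
              * (PySem.Int.mod (b * b) N) ^ (m / 2) [ZMOD N] := step
        _ ≡ (r * b ^ (m % 2)) * (b * b) ^ (m / 2) [ZMOD N] :=
            Int.ModEq.mul hr (Int.ModEq.pow _ (pmod_modeq _ _ hN))
        _ = r * b ^ m := by
            rw [show (b * b) ^ (m / 2) = b ^ (2 * (m / 2)) by rw [two_mul, pow_add]; ring,
               mul_assoc, ← pow_add]
            congr 2
            omega

-- the accumulator stays reduced mod N, so the result is its own residue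
lemma rtl_red (N : Int) (hN : 1 ≤ N) : ∀ (m : Nat) (b r : Int), r % N = r →
    pvPowModRTL m b r N % N = pvPowModRTL m b r N := by
  intro m
  induction m using Nat.strong_induction_on with
  | _ m ih =>
    intro b r hr
    rw [pvPowModRTL]
    by_cases h0 : m = 0
    · simpa [h0] using hr
    · rw [if_neg h0]
      refine ih (m / 2) (Nat.div_lt_self (by omega) (by omega)) _ _ ?_
      split
      · rw [pmod_emod _ _ hN, Int.emod_emod_of_dvd _ dvd_rfl]
      · exact hr

lemma alt_chunk_eq (chunk e N : Int) (he : 0 ≤ e) (hN : 1 ≤ N) :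
    pvPowModRTL e.toNat (PySem.Int.mod chunk N) (PySem.Int.mod 1 N) N = (chunk ^ e.natAbs) % N := by
  have hr0 : PySem.Int.mod 1 N % N = PySem.Int.mod 1 N := by
    rw [pmod_emod _ _ hN, Int.emod_emod_of_dvd _ dvd_rfl]
  have hred := rtl_red N hN e.toNat (PySem.Int.mod chunk N) (PySem.Int.mod 1 N) hr0
  have hc := rtl_cong N hN e.toNat (PySem.Int.mod chunk N) (PySem.Int.mod 1 N)
  have h2 : PySem.Int.mod 1 N * (PySem.Int.mod chunk N) ^ e.toNat
      ≡ 1 * chunk ^ e.toNat [ZMOD N] :=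
    Int.ModEq.mul (pmod_modeq _ _ hN) (Int.ModEq.pow _ (pmod_modeq _ _ hN))
  have hcc := hc.trans h2
  rw [one_mul] at hcc
  have hee : e.toNat = e.natAbs := by omega
  rw [← hred, hcc, hee]

-- ---- nibble-assembly side ----

lemma parse1F : ∀ x : Fin 16, PySem.Int.ofCharsBase? [Nat.digitChar x] 16 = some ((x : Nat) : Int) := by decide
lemma parse2F : ∀ x y : Fin 16, PySem.Int.ofCharsBase? [Nat.digitChar x, Nat.digitChar y] 16
    = some ((16 * (x : Nat) + (y : Nat) : Nat) : Int) := by decide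
lemma lor16F : ∀ x y : Fin 16, ((x : Nat) <<< 4) ||| (y : Nat) = 16 * (x : Nat) + (y : Nat) := by decide

-- structural pairing of a hex-digit string into byte characters (= pvPairJoin from index 0)
def pvPairs : List Char → List Char
  | [] => []
  | [a] => [Char.ofNat ((PySem.Int.ofCharsBase? [a] 16).getD 0).toNat]
  | a :: b :: t => Char.ofNat ((PySem.Int.ofCharsBase? [a, b] 16).getD 0).toNat :: pvPairs t

lemma pairJoin_eq (l : List Char) (i : Nat) : pvPairJoin l i = pvPairs (l.drop i) := by
  induction i using pvPairJoin.induct (l := l) with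
  | case1 i h ih =>
    rw [pvPairJoin, if_pos h]
    have hslice : PySem.List.slice l (some (i : Int)) (some ((i : Int) + 2)) = (l.drop i).take 2 := by
      have h2 := PySem.List.slice_natCast_add (xs := l) (j := i) (n := 2)
      push_cast at h2
      exact h2
    have hdd : l.drop (i + 2) = (l.drop i).drop 2 := by
      rw [List.drop_drop]
    rw [ih, hslice, hdd]
    cases hd : l.drop i with
    | nil => exfalso; have := List.length_drop (l := l) (i := i); rw [hd] at this; simp at this; omega
    | cons a t =>
      cases t with
      | nil => simp [pvPairs]
      | cons b t' => simp [pvPairs]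
  | case2 i h =>
    rw [pvPairJoin, if_neg h, List.drop_eq_nil_of_le (by omega)]
    rfl

lemma pvHexAux_append (n : Nat) : ∀ acc, pvHexAux n acc = pvHexAux n [] ++ acc := by
  induction n using Nat.strong_induction_on with
  | _ n ih =>
    intro acc
    by_cases h : n < 16
    · conv_lhs => rw [pvHexAux]
      conv_rhs => rw [pvHexAux]
      simp [h]
    · conv_lhs => rw [pvHexAux]
      conv_rhs => rw [pvHexAux]
      rw [if_neg h, if_neg h, ih (n / 16) (Nat.div_lt_self (by omega) (by omega)),
         ih (n / 16) (Nat.div_lt_self (by omega) (by omega)) [Nat.digitChar (n % 16)]]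
      simp

lemma pvHexAux_ge (n : Nat) (h : 16 ≤ n) :
    pvHexAux n [] = pvHexAux (n / 16) [] ++ [Nat.digitChar (n % 16)] := by
  rw [pvHexAux, if_neg (by omega), pvHexAux_append]

lemma pvNibsLow_ne_nil (n : Nat) (h : 0 < n) : pvNibsLow n ≠ [] := by
  rw [pvNibsLow, if_neg (by omega)]; simp

-- the hex-digit string is exactly the reversed nibble list rendered as digits
lemma hex_eq_map_pos (n : Nat) (h : 0 < n) :
    pvHexAux n [] = ((pvNibsLow n).reverse).map Nat.digitChar := by
  induction n using Nat.strong_induction_on with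
  | _ n ih =>
    by_cases h16 : n < 16
    · rw [pvHexAux, if_pos h16]
      rw [pvNibsLow, if_neg (by omega), pvNibsLow, if_pos (by omega : n / 16 = 0)]
      simp
      congr 1
      omega
    · rw [pvHexAux_ge n (by omega),
         ih (n / 16) (Nat.div_lt_self (by omega) (by omega)) (by omega)]
      conv_rhs => rw [pvNibsLow, if_neg (by omega)]
      simp

lemma hex_eq_map (n : Nat) : pvHexAux n [] = (pvNibs n).map Nat.digitChar := by
  by_cases h : n = 0
  · subst h
    rw [pvHexAux, if_pos (by omega)]
    rw [pvNibs, show pvNibsLow 0 = [] from by rw [pvNibsLow]; simp]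
    simp
  · rw [pvNibs, if_neg (pvNibsLow_ne_nil n (by omega)), hex_eq_map_pos n (by omega)]

lemma pvNibsLow_lt (n : Nat) : ∀ x ∈ pvNibsLow n, x < 16 := by
  induction n using Nat.strong_induction_on with
  | _ n ih =>
    intro x hx
    rw [pvNibsLow] at hx
    split at hx
    · simp at hx
    · rcases List.mem_cons.mp hx with h | h
      · omega
      · exact ih (n / 16) (Nat.div_lt_self (by omega) (by omega)) x h

lemma pvNibs_lt (n : Nat) : ∀ x ∈ pvNibs n, x < 16 := by
  intro x hx
  rw [pvNibs, List.mem_reverse] at hx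
  split at hx
  · simp at hx; omega
  · exact pvNibsLow_lt n x hx

lemma pairs_map (l : List Nat) (h : ∀ x ∈ l, x < 16) :
    pvPairs (l.map Nat.digitChar) = pvPairUp l := by
  induction l using pvPairUp.induct with
  | case1 => rfl
  | case2 a =>
    have ha : a < 16 := h a (by simp)
    show [Char.ofNat ((PySem.Int.ofCharsBase? [Nat.digitChar a] 16).getD 0).toNat] = [Char.ofNat a]
    rw [parse1F ⟨a, ha⟩]
    simp
  | case3 a b t ih =>
    have ha : a < 16 := h a (by simp)
    have hb : b < 16 := h b (by simp)
    show Char.ofNat ((PySem.Int.ofCharsBase? [Nat.digitChar a, Nat.digitChar b] 16).getD 0).toNat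
        :: pvPairs (t.map Nat.digitChar) = _
    rw [parse2F ⟨a, ha⟩ ⟨b, hb⟩, ih (fun x hx => h x (by simp [hx]))]
    rw [pvPairUp, lor16F ⟨a, ha⟩ ⟨b, hb⟩]
    congr 1

lemma chunk_str (r : Int) (h : 0 ≤ r) : pvPairJoin (pvHexStr r) 0 = pvPairUp (pvNibs r.toNat) := by
  rw [pvHexStr, if_neg (by omega), pairJoin_eq, List.drop_zero, hex_eq_map,
     pairs_map _ (pvNibs_lt _)]

-- ===== VERDICT (by name: the statement is the Claim_ definition above) =====
theorem decrypt_signed_message_spec : Claim_equal_decrypt_signed_message := by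
  intro msg e N _ hPre
  obtain ⟨he, hN⟩ := hPre
  unfold Spec_decrypt_signed_message decrypt_signed_message decrypt_signed_message_alt
  rw [PySem.List.foldl_append_eq_flatMap, List.nil_append]
  rw [← List.flatMap_def]
  congr 1
  have hfun : (fun signed_chunk => pvPairJoin (pvHexStr (square_and_multiply signed_chunk e N)) 0)
      = (fun chunk : Int =>
          pvPairUp (pvNibs (pvPowModRTL e.toNat (PySem.Int.mod chunk N) (PySem.Int.mod 1 N) N).toNat)) := by
    funext c
    rw [sam_eq c e N hN, chunk_str _ (Int.emod_nonneg _ (by omega)), alt_chunk_eq c e N he hN]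
  rw [hfun]
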